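-- pv_equiv track=rewrite | github.com/georgezambrano/tc-prediction | Algoritmo_TC.py | CalculateDenominatorForK
-- ===== SOURCE A (Python) =====
-- def CalculateDenominatorForK(errors):
--     suma = 0
--     product = 1
--     for i, v1 in enumerate(errors):
--         for j, v2 in enumerate(errors):
--             if j != i:
--                 product = product * v2
--         suma = suma + product
--         product = 1
--     return suma
-- ===== SOURCE B (Python) =====
-- def CalculateDenominatorForK(errors):
--     # O(n): suffix-product array + one forward prefix pass
--     n = len(errors)
--     suffix = [1] * (n + 1)
--     for i in range(n - 1, -1, -1):
--         suffix[i] = errors[i] * suffix[i + 1]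
--     total = 0
--     prefix = 1
--     for i in range(n):
--         total += prefix * suffix[i + 1]
--         prefix *= errors[i]
--     return total
-- ===== Notes on version B (the rewrite author's own statement) =====
-- stated objective: faster
-- what changed: Replaced the nested loop (for each i, re-multiply all other elements) by a single backward suffix-product pass plus one forward prefix pass, so each leave-one-out product is prefix[i]*suffix[i+1].
import Mathlib
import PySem

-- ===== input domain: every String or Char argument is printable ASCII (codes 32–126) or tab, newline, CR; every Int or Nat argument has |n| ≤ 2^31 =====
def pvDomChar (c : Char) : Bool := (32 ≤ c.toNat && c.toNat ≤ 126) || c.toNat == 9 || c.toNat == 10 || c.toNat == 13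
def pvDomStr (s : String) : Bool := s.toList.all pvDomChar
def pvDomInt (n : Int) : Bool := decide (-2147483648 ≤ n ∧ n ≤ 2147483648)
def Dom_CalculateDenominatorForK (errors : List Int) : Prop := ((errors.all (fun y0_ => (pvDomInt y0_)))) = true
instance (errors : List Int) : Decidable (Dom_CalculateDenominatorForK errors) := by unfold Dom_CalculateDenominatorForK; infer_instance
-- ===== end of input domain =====

-- B replaces A's quadratic nested re-multiplication by a linear suffix-product array plus a
-- forward prefix pass (objective: faster, asymptotic O(n^2) -> O(n)).

-- ===== PORT A =====
-- literal transliteration: outer state is (suma, product); the inner loop multiplies product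
-- by every v2 with j != i; after each outer step product is reset to 1.
def CalculateDenominatorForK (errors : List Int) : Int :=
  ((PySem.List.enumerate errors).foldl
    (fun (st : Int × Int) iv =>
      (st.1 + (PySem.List.enumerate errors).foldl
          (fun p jv => if jv.1 ≠ iv.1 then p * jv.2 else p) st.2, 1))
    (0, 1)).1

-- ===== PORT B =====
-- suffix[i] = errors[i] * suffix[i+1] (backward pass of Source B), built head-first by recursion
def pvSuffix : List Int → List Int
  | [] => [1]
  | x :: xs =>
    let s := pvSuffix xs
    (x * s.headI) :: s

-- forward pass of Source B: total += prefix * suffix[i+1]; prefix *= errors[i]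
def pvSum (pref : Int) : List Int → List Int → Int
  | x :: xs, s :: ss => pref * s + pvSum (pref * x) xs ss
  | _, _ => 0

def CalculateDenominatorForK_alt (errors : List Int) : Int :=
  pvSum 1 errors (pvSuffix errors).tail

-- ===== PRECONDITION & SPEC =====
def Spec_CalculateDenominatorForK (errors : List Int) (out : Int) : Prop := out = CalculateDenominatorForK_alt errors
instance (errors : List Int) (out : Int) : Decidable (Spec_CalculateDenominatorForK errors out) := by unfold Spec_CalculateDenominatorForK; infer_instance

-- ===== CLAIM (what is proved, stated in full; the proofs are below) =====
def Claim_equal_CalculateDenominatorForK : Prop := ∀ (errors : List Int), Dom_CalculateDenominatorForK errors → Spec_CalculateDenominatorForK errors (CalculateDenominatorForK errors)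

-- ===== LEMMAS AND PROOFS =====

-- A's inner loop, with explicit start value
def innA (i : Int) (a : Int) (E : List (Int × Int)) : Int :=
  E.foldl (fun p jv => if jv.1 ≠ i then p * jv.2 else p) a

-- A's outer loop after eliminating the (… , 1) pair state
def outA (E : List (Int × Int)) (t : Int) (L : List (Int × Int)) : Int :=
  L.foldl (fun t iv => t + innA iv.1 1 E) t

lemma innA_cons (i a : Int) (jv : Int × Int) (E : List (Int × Int)) :
    innA i a (jv :: E) = innA i (if jv.1 ≠ i then a * jv.2 else a) E := rfl

lemma outA_cons (E : List (Int × Int)) (t : Int) (iv : Int × Int) (L : List (Int × Int)) :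
    outA E t (iv :: L) = outA E (t + innA iv.1 1 E) L := rfl

lemma innA_base (i : Int) (E : List (Int × Int)) : ∀ a, innA i a E = a * innA i 1 E := by
  induction E with
  | nil => intro a; simp [innA]
  | cons jv E ih =>
    intro a
    rw [innA_cons, innA_cons]
    by_cases h : jv.1 ≠ i
    · rw [if_pos h, if_pos h, ih (a * jv.2), ih (1 * jv.2)]; ring
    · rw [if_neg h, if_neg h]; exact ih a

lemma innA_all (xs : List Int) : ∀ (s i a : Int), i < s →
    innA i a (PySem.List.enumerate xs s) = a * xs.prod := by
  induction xs with
  | nil => intro s i a _; simp [innA, PySem.List.enumerate_nil]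
  | cons x xs ih =>
    intro s i a h
    rw [PySem.List.enumerate_cons, innA_cons]
    dsimp only
    rw [if_pos (by omega : s ≠ i), ih (s + 1) i (a * x) (by omega), List.prod_cons]
    ring

lemma fst_outer (E : List (Int × Int)) :
    ∀ (L : List (Int × Int)) (t : Int),
      (L.foldl (fun (st : Int × Int) iv => (st.1 + innA iv.1 st.2 E, 1)) (t, 1)).1
        = outA E t L := by
  intro L
  induction L with
  | nil => intro t; simp [outA]
  | cons iv L ih =>
    intro t
    rw [List.foldl_cons, outA_cons]
    exact ih (t + innA iv.1 1 E)

lemma outA_rebase (E : List (Int × Int)) :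
    ∀ (L : List (Int × Int)) (t : Int), outA E t L = t + outA E 0 L := by
  intro L
  induction L with
  | nil => intro t; simp [outA]
  | cons iv L ih =>
    intro t
    rw [outA_cons, outA_cons, ih (t + innA iv.1 1 E), ih (0 + innA iv.1 1 E)]
    ring

-- pulling a common factor x out of every inner product
lemma outA_factor (x : Int) (E : List (Int × Int)) :
    ∀ (L : List (Int × Int)),
      (∀ iv ∈ L, innA iv.1 1 E = x * innA iv.1 1 (E.tail)) →
      outA E 0 L = x * outA E.tail 0 L := by
  intro L
  induction L with
  | nil => intro _; simp [outA]
  | cons iv L ih =>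
    intro h
    rw [outA_cons, outA_cons, outA_rebase E, outA_rebase E.tail,
        h iv (List.mem_cons_self), ih (fun jv hj => h jv (List.mem_cons_of_mem _ hj))]
    ring

-- index-shift invariance of the inner loop
lemma innA_map_shift (E : List (Int × Int)) : ∀ (i a : Int),
    innA (i + 1) a (E.map (fun p => (p.1 + 1, p.2))) = innA i a E := by
  induction E with
  | nil => intro i a; rfl
  | cons jv E ih =>
    intro i a
    rw [List.map_cons, innA_cons, innA_cons]
    dsimp only
    by_cases h : jv.1 = i
    · rw [if_neg (by omega), if_neg (by omega)]; exact ih i a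
    · rw [if_pos (by omega), if_pos (by omega)]; exact ih i (a * jv.2)

lemma enumerate_shift_map (xs : List Int) : ∀ s : Int,
    PySem.List.enumerate xs (s + 1)
      = (PySem.List.enumerate xs s).map (fun p => (p.1 + 1, p.2)) := by
  induction xs with
  | nil => intro s; simp [PySem.List.enumerate_nil]
  | cons x xs ih =>
    intro s
    rw [PySem.List.enumerate_cons, PySem.List.enumerate_cons, List.map_cons]
    exact congrArg _ (ih (s + 1))

-- the full quadratic sum, with an arbitrary enumeration start
def SA (xs : List Int) (s : Int) : Int :=
  outA (PySem.List.enumerate xs s) 0 (PySem.List.enumerate xs s)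

lemma SA_shift (xs : List Int) (s : Int) : SA xs (s + 1) = SA xs s := by
  unfold SA outA
  rw [enumerate_shift_map xs s, List.foldl_map]
  congr 1
  funext t iv
  dsimp only
  rw [innA_map_shift]

lemma SA_rec (x : Int) (xs : List Int) (s : Int) :
    SA (x :: xs) s = xs.prod + x * SA xs (s + 1) := by
  unfold SA
  rw [PySem.List.enumerate_cons, outA_cons]
  have hfirst : innA ((s, x) : Int × Int).1 1 ((s, x) :: PySem.List.enumerate xs (s + 1)) = xs.prod := by
    rw [innA_cons]
    dsimp only
    rw [if_neg (by omega : ¬ s ≠ s)]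
    simpa using innA_all xs (s + 1) s 1 (by omega)
  have hrest : ∀ iv ∈ PySem.List.enumerate xs (s + 1),
      innA iv.1 1 ((s, x) :: PySem.List.enumerate xs (s + 1))
        = x * innA iv.1 1 (((s, x) :: PySem.List.enumerate xs (s + 1)).tail) := by
    intro iv hiv
    obtain ⟨k, hk, hp⟩ := (PySem.List.mem_enumerate_iff xs (s + 1) iv).1 hiv
    subst hp
    rw [innA_cons, List.tail_cons]
    dsimp only
    rw [if_pos (by omega : s ≠ s + 1 + (k : Int)), innA_base]
    ring
  rw [hfirst, outA_rebase, outA_factor x _ _ hrest, List.tail_cons,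
      show outA (PySem.List.enumerate xs (s + 1)) 0 (PySem.List.enumerate xs (s + 1))
        = SA xs (s + 1) from rfl]
  ring

lemma A_eq_SA (errors : List Int) : CalculateDenominatorForK errors = SA errors 0 := by
  exact fst_outer (PySem.List.enumerate errors) (PySem.List.enumerate errors) 0

-- ===== B side =====

lemma pvSuffix_cons_form (l : List Int) :
    pvSuffix l = l.prod :: (pvSuffix l).tail := by
  induction l with
  | nil => simp [pvSuffix]
  | cons x xs ih =>
    rw [show pvSuffix (x :: xs) = (x * (pvSuffix xs).headI) :: pvSuffix xs from rfl,
        List.tail_cons]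
    have h2 : (pvSuffix xs).headI = xs.prod := by rw [ih]; rfl
    rw [h2, List.prod_cons]

def GB (pref : Int) (l : List Int) : Int := pvSum pref l (pvSuffix l).tail

lemma GB_rec (pref x : Int) (xs : List Int) :
    GB pref (x :: xs) = pref * xs.prod + GB (pref * x) xs := by
  show pvSum pref (x :: xs) (pvSuffix (x :: xs)).tail = pref * xs.prod + GB (pref * x) xs
  conv_lhs => rw [show (pvSuffix (x :: xs)).tail = pvSuffix xs from rfl, pvSuffix_cons_form xs]
  rfl

lemma GB_scale (l : List Int) : ∀ pref, GB pref l = pref * GB 1 l := by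
  induction l with
  | nil => intro pref; simp [GB, pvSum]
  | cons x xs ih =>
    intro pref
    rw [GB_rec, GB_rec 1, ih (pref * x), ih (1 * x)]
    ring

lemma B_rec (x : Int) (xs : List Int) :
    CalculateDenominatorForK_alt (x :: xs)
      = xs.prod + x * CalculateDenominatorForK_alt xs := by
  show GB 1 (x :: xs) = xs.prod + x * GB 1 xs
  rw [GB_rec, GB_scale xs (1 * x)]
  ring

lemma main_eq (errors : List Int) :
    CalculateDenominatorForK errors = CalculateDenominatorForK_alt errors := by
  rw [A_eq_SA]
  induction errors with
  | nil => rfl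
  | cons x xs ih =>
    rw [SA_rec, SA_shift, B_rec, ih]

-- ===== VERDICT (by name: the statement is the Claim_ definition above) =====
theorem CalculateDenominatorForK_spec : Claim_equal_CalculateDenominatorForK := by
  intro errors _
  exact main_eq errors
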